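-- pv_equiv track=rewrite | github.com/erenaykrcn/ccU | examples/Kagome/cluster/verification_PEPS.py | _edges_from_permutations
-- ===== SOURCE A (Python) =====
-- def _edges_from_permutations(perms_1, perms_2, perms_3):
--     """
--     Take the three [src, tgt] permutation pairs and return a sorted list of
--     unique undirected edges (i, j) with i < j.
--     """
--     edge_set = set()
--
--     for perms in (perms_1, perms_2, perms_3):
--         src, tgt = perms
--         for a, b in zip(src, tgt):
--             if a == b:
--                 continue
--             i, j = sorted((a, b))
--             edge_set.add((i, j))
--
--     return sorted(edge_set)
-- ===== SOURCE B (Python) =====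
-- def _insert_unique(out, e):
--     """Insert edge e into the sorted duplicate-free list out, keeping it so."""
--     i = 0
--     while i < len(out) and out[i] < e:
--         i += 1
--     if i < len(out) and out[i] == e:
--         return out
--     return out[:i] + [e] + out[i:]
--
--
-- def _edges_from_permutations(perms_1, perms_2, perms_3):
--     """
--     Take the three [src, tgt] permutation pairs and return a sorted list of
--     unique undirected edges (i, j) with i < j.
--     """
--     out = []
--     for src, tgt in (perms_1, perms_2, perms_3):
--         for a, b in zip(src, tgt):
--             if a == b:
--                 continue
--             out = _insert_unique(out, (a, b) if a < b else (b, a))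
--     return out
-- ===== Notes on version B (the rewrite author's own statement) =====
-- stated objective: alternative
-- what changed: Replaces A's hash-set accumulation plus one final sort by maintaining the result itself as a sorted duplicate-free list: each normalized edge is placed by an ordered-insertion helper (linear search for its position, skip if already present), so there is no set and no final sorting pass.
import Mathlib
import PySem

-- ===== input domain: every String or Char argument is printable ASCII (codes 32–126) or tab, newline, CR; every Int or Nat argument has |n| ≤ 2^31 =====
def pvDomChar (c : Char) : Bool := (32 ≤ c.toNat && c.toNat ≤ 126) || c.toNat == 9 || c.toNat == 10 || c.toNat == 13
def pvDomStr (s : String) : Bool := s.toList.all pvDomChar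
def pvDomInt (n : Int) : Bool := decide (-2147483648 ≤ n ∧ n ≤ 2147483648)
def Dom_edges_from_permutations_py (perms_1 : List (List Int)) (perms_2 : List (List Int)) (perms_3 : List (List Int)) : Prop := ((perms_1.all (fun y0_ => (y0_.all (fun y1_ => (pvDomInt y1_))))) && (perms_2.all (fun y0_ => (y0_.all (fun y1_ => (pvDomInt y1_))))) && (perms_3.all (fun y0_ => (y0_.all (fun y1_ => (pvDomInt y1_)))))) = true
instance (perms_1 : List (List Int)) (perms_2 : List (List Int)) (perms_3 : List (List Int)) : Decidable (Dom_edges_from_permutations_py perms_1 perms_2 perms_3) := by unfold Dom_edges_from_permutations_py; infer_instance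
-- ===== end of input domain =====

-- ===== PORT A =====
-- B maintains the answer as a sorted duplicate-free list via ordered insertion,
-- instead of A's hash-set accumulation followed by one final sort (objective: alternative).
-- A-side helper: i, j = sorted((a, b))
def pvNormA (a b : Int) : Int × Int := if a ≤ b then (a, b) else (b, a)

-- A-side: one iteration of "for perms in (...)": src, tgt = perms; inner loop adding to the set
def pvAddPerm (s : PySem.Set (Int × Int)) (perms : List (List Int)) : PySem.Set (Int × Int) :=
  match perms with
  | [src, tgt] =>
      (src.zip tgt).foldl
        (fun s ab => if ab.1 = ab.2 then s else PySem.Set.add s (pvNormA ab.1 ab.2)) s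
  | _ => s  -- unreachable under Pre_ (Python raises on unpacking)

def edges_from_permutations_py (perms_1 : List (List Int)) (perms_2 : List (List Int)) (perms_3 : List (List Int)) : List (Int × Int) :=
  PySem.List.sorted2 ([perms_1, perms_2, perms_3].foldl pvAddPerm PySem.Set.empty) Prod.fst Prod.snd

-- ===== PORT B =====
-- B-side helper: the while-loop of _insert_unique hunting for e's position
-- (Python tuple '<' on int pairs is the lexicographic order toLex)
def pvFindPos : List (Int × Int) → (Int × Int) → Nat
  | [], _ => 0
  | h :: t, e => if toLex h < toLex e then 1 + pvFindPos t e else 0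

-- B-side helper: _insert_unique(out, e); take/drop are exact for the slices out[:i], out[i:]
-- since 0 ≤ i ≤ len(out)
def pvInsertUnique (out : List (Int × Int)) (e : Int × Int) : List (Int × Int) :=
  let i := pvFindPos out e
  if PySem.List.pyGet? out (i : Int) = some e then out
  else out.take i ++ [e] ++ out.drop i

-- B-side: the inner "for a, b in zip(src, tgt)" loop as recursion over the zipped list
def pvScan : List (Int × Int) → List (Int × Int) → List (Int × Int)
  | out, [] => out
  | out, ab :: rest =>
      if ab.1 = ab.2 then pvScan out rest
      else pvScan (pvInsertUnique out (if ab.1 < ab.2 then (ab.1, ab.2) else (ab.2, ab.1))) rest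

-- B-side: one iteration of "for src, tgt in (...)"
def pvPermStep (out : List (Int × Int)) (perms : List (List Int)) : List (Int × Int) :=
  match perms with
  | [src, tgt] => pvScan out (src.zip tgt)
  | _ => out  -- unreachable under Pre_ (Python raises on unpacking)

def edges_from_permutations_py_alt (perms_1 : List (List Int)) (perms_2 : List (List Int)) (perms_3 : List (List Int)) : List (Int × Int) :=
  pvPermStep (pvPermStep (pvPermStep [] perms_1) perms_2) perms_3

-- ===== PRECONDITION & SPEC =====
-- Pre_ excludes exactly the inputs where Python raises: "src, tgt = perms" (in A) and
-- "for src, tgt in (...)" (in B) raise ValueError/TypeError unless each perms_i has exactly 2 items.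
def Pre_edges_from_permutations_py (perms_1 : List (List Int)) (perms_2 : List (List Int)) (perms_3 : List (List Int)) : Prop :=
  perms_1.length = 2 ∧ perms_2.length = 2 ∧ perms_3.length = 2
instance (perms_1 : List (List Int)) (perms_2 : List (List Int)) (perms_3 : List (List Int)) : Decidable (Pre_edges_from_permutations_py perms_1 perms_2 perms_3) := by unfold Pre_edges_from_permutations_py; infer_instance

def pvWitness_edges_from_permutations_py : List (List Int) × List (List Int) × List (List Int) :=
  ([[1, 2, 3], [2, 1, 3]], [[0, 5], [5, 0]], [[4], [6]])

def Spec_edges_from_permutations_py (perms_1 : List (List Int)) (perms_2 : List (List Int)) (perms_3 : List (List Int)) (out : List (Int × Int)) : Prop := out = edges_from_permutations_py_alt perms_1 perms_2 perms_3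
instance (perms_1 : List (List Int)) (perms_2 : List (List Int)) (perms_3 : List (List Int)) (out : List (Int × Int)) : Decidable (Spec_edges_from_permutations_py perms_1 perms_2 perms_3 out) := by unfold Spec_edges_from_permutations_py; infer_instance

-- ===== CLAIM (what is proved, stated in full; the proofs are below) =====
def Claim_equal_edges_from_permutations_py : Prop := ∀ (perms_1 : List (List Int)) (perms_2 : List (List Int)) (perms_3 : List (List Int)), Dom_edges_from_permutations_py perms_1 perms_2 perms_3 → Pre_edges_from_permutations_py perms_1 perms_2 perms_3 → Spec_edges_from_permutations_py perms_1 perms_2 perms_3 (edges_from_permutations_py perms_1 perms_2 perms_3)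

-- ===== LEMMAS AND PROOFS =====

-- The Python tuple order on pairs of ints is the lexicographic order: sorted2 is sorted by toLex.
theorem pv_sorted2_eq_sorted_toLex (xs : List (Int × Int)) :
    PySem.List.sorted2 xs Prod.fst Prod.snd = PySem.List.sorted xs (fun x => toLex x) := by
  have hb : (fun (a b : Int × Int) => decide (a.1 < b.1) || (!decide (b.1 < a.1) && decide (a.2 < b.2)))
      = fun (a b : Int × Int) => decide ((toLex a : Lex (Int × Int)) < toLex b) := by
    funext a b
    have h := Prod.Lex.toLex_lt_toLex (x := a) (y := b)
    apply Bool.eq_iff_iff.mpr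
    simp only [Bool.or_eq_true, Bool.and_eq_true, Bool.not_eq_true', decide_eq_true_eq,
      decide_eq_false_iff_not, h]
    omega
  simp only [PySem.List.sorted2, PySem.List.sorted, if_neg (by decide : ¬ (false = true))]
  rw [hb]

-- ordered-insert in the recursive form used by the proofs
def pvIns (out : List (Int × Int)) (e : Int × Int) : List (Int × Int) :=
  match out with
  | [] => [e]
  | h :: t =>
      if toLex e < toLex h then e :: h :: t
      else if e = h then h :: t
      else h :: pvIns t e

theorem pv_insertUnique_eq_ins (out : List (Int × Int)) (e : Int × Int) :
    pvInsertUnique out e = pvIns out e := by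
  induction out with
  | nil => rfl
  | cons h t ih =>
    unfold pvInsertUnique pvIns
    by_cases hlt : toLex h < toLex e
    · have h1 : ¬ toLex e < toLex h := not_lt_of_gt hlt
      have h2 : e ≠ h := fun hEq => by subst hEq; exact lt_irrefl _ hlt
      simp only [pvFindPos, if_pos hlt, if_neg h1, if_neg h2]
      have hcast : ((1 + pvFindPos t e : Nat) : Int) = ((pvFindPos t e : Nat) : Int) + 1 := by
        push_cast; ring
      rw [hcast, PySem.List.pyGet?_cons_succ]
      by_cases hg : PySem.List.pyGet? t ((pvFindPos t e : Nat) : Int) = some e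
      · rw [if_pos hg]
        have := ih
        rw [pvInsertUnique, if_pos hg] at this
        rw [← this]
      · rw [if_neg hg]
        have := ih
        rw [pvInsertUnique, if_neg hg] at this
        rw [Nat.add_comm 1 (pvFindPos t e)]
        simp only [List.take_succ_cons, List.drop_succ_cons, List.cons_append, this]
    · simp only [pvFindPos, if_neg hlt]
      rw [show ((0 : Nat) : Int) = 0 from rfl, PySem.List.pyGet?_zero_cons]
      by_cases he : e = h
      · subst he; simp
      · have hel : toLex e < toLex h := by
          rcases lt_trichotomy (toLex e) (toLex h) with h1 | h1 | h1
          · exact h1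
          · exact absurd (toLex.injective h1) he
          · exact absurd h1 hlt
        rw [if_neg (by simpa using Ne.symm (fun hEq => he (toLex.injective (by rw [hEq])))),
          if_pos hel]
        rfl

theorem pv_mem_ins (out : List (Int × Int)) (e x : Int × Int) :
    x ∈ pvIns out e ↔ x = e ∨ x ∈ out := by
  induction out with
  | nil => simp [pvIns]
  | cons h t ih =>
    unfold pvIns
    split_ifs with h1 h2
    · simp only [List.mem_cons]
    · subst h2; simp only [List.mem_cons]; tauto
    · simp only [List.mem_cons, ih]; tauto

theorem pv_pairwise_ins (out : List (Int × Int)) (e : Int × Int)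
    (h : out.Pairwise (fun a b => (toLex a : Lex (Int × Int)) < toLex b)) :
    (pvIns out e).Pairwise (fun a b => (toLex a : Lex (Int × Int)) < toLex b) := by
  induction out with
  | nil => simp [pvIns]
  | cons hd t ih =>
    rcases List.pairwise_cons.1 h with ⟨hhd, ht⟩
    unfold pvIns
    split_ifs with h1 h2
    · exact List.pairwise_cons.2 ⟨by
        intro x hx
        rcases List.mem_cons.1 hx with rfl | hx
        · exact h1
        · exact lt_trans h1 (hhd x hx), h⟩
    · exact h
    · have hlt : (toLex hd : Lex (Int × Int)) < toLex e := by
        rcases lt_trichotomy (toLex hd) (toLex e) with hh | hh | hh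
        · exact hh
        · exact absurd (toLex.injective hh).symm h2
        · exact absurd hh h1
      refine List.pairwise_cons.2 ⟨?_, ih ht⟩
      intro x hx
      rcases (pv_mem_ins t e x).1 hx with rfl | hx
      · exact hlt
      · exact hhd x hx

-- the normalized-edge list produced by one [src, tgt] pair, shared by both directions
def pvEdges (perms : List (List Int)) : List (Int × Int) :=
  match perms with
  | [src, tgt] =>
      (src.zip tgt).filterMap
        (fun ab => if ab.1 = ab.2 then none
                   else some (if ab.1 < ab.2 then (ab.1, ab.2) else (ab.2, ab.1)))
  | _ => []

theorem pv_addPerm_eq (perms : List (List Int)) (s : PySem.Set (Int × Int)) :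
    pvAddPerm s perms = (pvEdges perms).foldl PySem.Set.add s := by
  match perms with
  | [] => rfl
  | [_] => rfl
  | _ :: _ :: _ :: _ => rfl
  | [src, tgt] =>
    have he : pvEdges [src, tgt]
        = (src.zip tgt).filterMap
            (fun ab => if ab.1 = ab.2 then none
                       else some (if ab.1 < ab.2 then (ab.1, ab.2) else (ab.2, ab.1))) := rfl
    rw [he]
    show (src.zip tgt).foldl _ s = _
    generalize src.zip tgt = zs
    induction zs generalizing s with
    | nil => rfl
    | cons ab zs ih =>
      by_cases h : ab.1 = ab.2
      · simp only [List.foldl_cons, List.filterMap_cons, if_pos h]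
        exact ih _
      · have hn : pvNormA ab.1 ab.2 = (if ab.1 < ab.2 then (ab.1, ab.2) else (ab.2, ab.1)) := by
          unfold pvNormA
          by_cases h1 : ab.1 < ab.2
          · rw [if_pos (le_of_lt h1), if_pos h1]
          · rw [if_neg h1, if_neg (by omega)]
        simp only [List.foldl_cons, List.filterMap_cons, if_neg h, hn]
        exact ih _

theorem pv_scan_eq (zs : List (Int × Int)) (out : List (Int × Int)) :
    pvScan out zs
      = (zs.filterMap
          (fun ab => if ab.1 = ab.2 then none
                     else some (if ab.1 < ab.2 then (ab.1, ab.2) else (ab.2, ab.1)))).foldl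
          pvIns out := by
  induction zs generalizing out with
  | nil => rfl
  | cons ab zs ih =>
    unfold pvScan
    by_cases h : ab.1 = ab.2
    · simp only [List.filterMap_cons, if_pos h, ih]
    · simp only [List.filterMap_cons, if_neg h, List.foldl_cons, ih, pv_insertUnique_eq_ins]

theorem pv_permStep_eq (perms : List (List Int)) (out : List (Int × Int)) :
    pvPermStep out perms = (pvEdges perms).foldl pvIns out := by
  match perms with
  | [] => rfl
  | [_] => rfl
  | _ :: _ :: _ :: _ => rfl
  | [src, tgt] => exact pv_scan_eq (src.zip tgt) out

theorem pv_foldl_ins_spec (E : List (Int × Int)) (acc : List (Int × Int))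
    (hp : acc.Pairwise (fun a b => (toLex a : Lex (Int × Int)) < toLex b)) :
    (E.foldl pvIns acc).Pairwise (fun a b => (toLex a : Lex (Int × Int)) < toLex b)
      ∧ (∀ x, x ∈ E.foldl pvIns acc ↔ x ∈ acc ∨ x ∈ E) := by
  induction E generalizing acc with
  | nil => exact ⟨hp, by simp⟩
  | cons e E ih =>
    rcases ih (pvIns acc e) (pv_pairwise_ins acc e hp) with ⟨h1, h2⟩
    refine ⟨h1, ?_⟩
    intro x
    rw [List.foldl_cons, h2, pv_mem_ins]
    simp
    tauto

-- the core equality: sorting the set of E equals folding ordered-insert over E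
theorem pv_main (E : List (Int × Int)) :
    PySem.List.sorted2 (PySem.Set.ofList E) Prod.fst Prod.snd = E.foldl pvIns [] := by
  rw [pv_sorted2_eq_sorted_toLex]
  rcases pv_foldl_ins_spec E [] (by simp) with ⟨hpw, hmem⟩
  apply PySem.List.sorted_eq_of_perm_of_pairwise_lt (κ := Lex (Int × Int)) _ _ (fun x => toLex x)
  · refine (List.perm_ext_iff_of_nodup ?_ ?_).2 ?_
    · exact hpw.imp (fun hab hEq => by subst hEq; exact lt_irrefl _ hab)
    · exact PySem.Set.nodup_ofList E
    · intro x
      rw [hmem x, PySem.Set.mem_ofList]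
      simp
  · exact hpw

-- ===== VERDICT (by name: the statement is the Claim_ definition above) =====
theorem edges_from_permutations_py_spec : Claim_equal_edges_from_permutations_py := by
  intro p1 p2 p3 _ _
  unfold Spec_edges_from_permutations_py edges_from_permutations_py edges_from_permutations_py_alt
  simp only [List.foldl_cons, List.foldl_nil, pv_addPerm_eq, pv_permStep_eq]
  rw [show (PySem.Set.empty : PySem.Set (Int × Int)) = ([] : List (Int × Int)) from rfl]
  rw [← List.foldl_append, ← List.foldl_append, ← List.foldl_append, ← List.foldl_append]
  exact pv_main _
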